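-- pv_equiv track=rewrite | github.com/phatryun/Advent_code | 2020/day 7/Exercice7.py | getNodeFromColor
-- ===== SOURCE A (Python) =====
-- def getNodeFromColor(bags, color):
--     if not color in bags.keys() :
--         return []
--     else :
--         res = []#[color]
--         for c in bags[color] :
--             res += [c] + getNodeFromColor(bags, c)
--         return res
-- ===== SOURCE B (Python) =====
-- def getNodeFromColor(bags, color):
--     if color not in bags:
--         return []
--     res = []
--     def visit(c):
--         res.append(c)
--         for ch in bags.get(c, ()):
--             visit(ch)
--     for c in bags[color]:
--         visit(c)
--     return res
-- ===== Notes on version B (the rewrite author's own statement) =====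
-- stated objective: alternative
-- what changed: A's recursion returns [c] + recursive-list and concatenates these per child at every level (re-copying each subtree list once per ancestor); B does one preorder traversal that appends each emitted node exactly once to a single shared accumulator. Pre_ excludes key graphs with a cycle reachable from color, on which Python A recurses forever (RecursionError).
import Mathlib
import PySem

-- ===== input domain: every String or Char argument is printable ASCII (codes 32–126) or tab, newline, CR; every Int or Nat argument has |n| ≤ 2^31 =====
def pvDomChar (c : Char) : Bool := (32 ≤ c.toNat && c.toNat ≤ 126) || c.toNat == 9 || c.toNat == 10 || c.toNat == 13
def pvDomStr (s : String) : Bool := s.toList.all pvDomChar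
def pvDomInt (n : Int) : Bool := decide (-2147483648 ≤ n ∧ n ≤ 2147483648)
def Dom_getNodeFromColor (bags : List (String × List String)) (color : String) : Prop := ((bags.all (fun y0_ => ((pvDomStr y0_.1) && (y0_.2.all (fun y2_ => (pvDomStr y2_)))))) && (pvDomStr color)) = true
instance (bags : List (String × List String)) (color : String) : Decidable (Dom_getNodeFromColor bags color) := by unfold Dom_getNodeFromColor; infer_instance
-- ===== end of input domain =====

-- B replaces A's recursion returning per-level list concatenations (res += [c] + recursive
-- result) by a single preorder traversal appending each node once to one shared accumulator.

-- ===== PORT A =====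
-- A's recursion: each call returns the concatenation [c] + desc(c) over the children.
-- Fuel (bags.length + 1) bounds the recursion depth; on acyclic inputs (Pre_) the
-- chain of found keys is duplicate-free, so this fuel is never exhausted.
def pvGoA (bags : List (String × List String)) : Nat → String → List String
  | 0, _ => []
  | n + 1, color =>
    match List.lookup color bags with
    | none => []
    | some cs => cs.foldl (fun res c => res ++ [c] ++ pvGoA bags n c) []

def getNodeFromColor (bags : List (String × List String)) (color : String) : List String :=
  pvGoA bags (bags.length + 1) color

-- ===== PORT B =====
-- B's visit: append c to the shared accumulator, then recurse into bags.get(c, ()).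
def pvVisitB (bags : List (String × List String)) : Nat → List String → String → List String
  | 0, acc, _ => acc
  | n + 1, acc, c =>
    (List.lookup c bags).getD [] |>.foldl (fun a ch => pvVisitB bags n a ch) (acc ++ [c])

def getNodeFromColor_alt (bags : List (String × List String)) (color : String) : List String :=
  match List.lookup color bags with
  | none => []
  | some cs => cs.foldl (fun a c => pvVisitB bags (bags.length + 1) a c) []

-- ===== PRECONDITION & SPEC =====
-- Pre_ excludes inputs with a key cycle reachable from color: there the Python A recurses
-- forever (RecursionError). pvReach iterates the successor map to the set of nodes reachable
-- in one or more steps; Pre_ says no key reachable from color (or color itself) reaches itself.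
def pvSuccs (bags : List (String × List String)) (k : String) : List String :=
  (List.lookup k bags).getD []

def pvReach (bags : List (String × List String)) (k : String) : List String :=
  Nat.rec (pvSuccs bags k)
    (fun _ s => s.foldl (fun acc x => acc ++ (pvSuccs bags x).filter (fun y => ¬ y ∈ acc)) s)
    (bags.length + 1)

def Pre_getNodeFromColor (bags : List (String × List String)) (color : String) : Prop :=
  ∀ k ∈ bags.map Prod.fst, (k = color ∨ k ∈ pvReach bags color) → k ∉ pvReach bags k

instance (bags : List (String × List String)) (color : String) : Decidable (Pre_getNodeFromColor bags color) := by
  unfold Pre_getNodeFromColor; infer_instance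

def pvWitness_getNodeFromColor : (List (String × List String)) × String :=
  ([("a", ["b", "c"]), ("b", ["c"]), ("c", [])], "a")

def Spec_getNodeFromColor (bags : List (String × List String)) (color : String) (out : List String) : Prop := out = getNodeFromColor_alt bags color
instance (bags : List (String × List String)) (color : String) (out : List String) : Decidable (Spec_getNodeFromColor bags color out) := by unfold Spec_getNodeFromColor; infer_instance

-- ===== CLAIM (what is proved, stated in full; the proofs are below) =====
def Claim_equal_getNodeFromColor : Prop := ∀ (bags : List (String × List String)) (color : String), Dom_getNodeFromColor bags color → Pre_getNodeFromColor bags color → Spec_getNodeFromColor bags color (getNodeFromColor bags color)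

-- ===== LEMMAS AND PROOFS =====

-- The key bridge: one B-visit with fuel n+1 appends exactly [c] ++ (A's descendant list at fuel n).
theorem pvVisitB_eq (bags : List (String × List String)) :
    ∀ (n : Nat) (acc : List String) (c : String),
      pvVisitB bags (n + 1) acc c = acc ++ [c] ++ pvGoA bags n c := by
  intro n
  induction n with
  | zero =>
    intro acc c
    simp only [pvVisitB, pvGoA]
    rw [PySem.List.foldl_ignore]
    simp
  | succ m ih =>
    intro acc c
    rw [show pvVisitB bags (m + 1 + 1) acc c
          = ((List.lookup c bags).getD []).foldl (fun a ch => pvVisitB bags (m + 1) a ch) (acc ++ [c]) from rfl,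
        show pvGoA bags (m + 1) c
          = (match List.lookup c bags with
             | none => []
             | some cs => cs.foldl (fun res x => res ++ [x] ++ pvGoA bags m x) []) from rfl]
    cases h : List.lookup c bags with
    | none => simp
    | some cs =>
      simp only [Option.getD_some]
      rw [PySem.List.foldl_congr_mem cs (fun a ch => pvVisitB bags (m + 1) a ch)
            (fun a ch => a ++ ([ch] ++ pvGoA bags m ch)) (acc ++ [c])
            (fun a x _ => by simpa using ih a x),
          PySem.List.foldl_append_eq_flatMap,
          PySem.List.foldl_congr_mem cs (fun res x => res ++ [x] ++ pvGoA bags m x)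
            (fun res x => res ++ ([x] ++ pvGoA bags m x)) []
            (fun a x _ => by simp),
          PySem.List.foldl_append_eq_flatMap]
      simp

-- ===== VERDICT (by name: the statement is the Claim_ definition above) =====
theorem getNodeFromColor_spec : Claim_equal_getNodeFromColor := by
  intro bags color _ _
  unfold Spec_getNodeFromColor getNodeFromColor getNodeFromColor_alt
  simp only [pvGoA]
  cases h : List.lookup color bags with
  | none => rfl
  | some cs =>
    show cs.foldl (fun res c => res ++ [c] ++ pvGoA bags bags.length c) []
        = cs.foldl (fun a c => pvVisitB bags (bags.length + 1) a c) []
    rw [PySem.List.foldl_congr_mem cs (fun a c => pvVisitB bags (bags.length + 1) a c)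
          (fun a c => a ++ ([c] ++ pvGoA bags bags.length c)) []
          (fun a x _ => by simpa using pvVisitB_eq bags bags.length a x),
        PySem.List.foldl_congr_mem cs (fun res c => res ++ [c] ++ pvGoA bags bags.length c)
          (fun a c => a ++ ([c] ++ pvGoA bags bags.length c)) []
          (fun a x _ => by simp)]
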